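-- pv_equiv track=rewrite | github.com/sudsho/leetcode-solutions | 0805-split-array-with-same-average/python/solution.py | _has_subset_of_size_with_sum
-- ===== SOURCE A (Python) =====
-- from typing import List
-- from itertools import combinations
--
-- def _has_subset_of_size_with_sum(nums: List[int], k: int, target: int) -> bool:
--     n = len(nums)
--     left, right = nums[:n // 2], nums[n // 2:]
--     from collections import defaultdict
--     left_map: dict[int, set[int]] = defaultdict(set)
--     for r in range(len(left) + 1):
--         for c in combinations(left, r):
--             left_map[r].add(sum(c))
--     for r in range(len(right) + 1):
--         need_size = k - r
--         if 0 <= need_size <= len(left):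
--             for c in combinations(right, r):
--                 s_right = sum(c)
--                 if (target - s_right) in left_map[need_size]:
--                     if not (need_size == 0 and r == 0) and not (need_size == len(left) and r == len(right)):
--                         return True
--     return False
-- ===== SOURCE B (Python) =====
-- def _has_subset_of_size_with_sum(nums, k, target):
--     # DP over (count, sum): reach[c] = sums achievable by picking exactly c elements.
--     n = len(nums)
--     if not (0 < k < n):
--         return False
--     reach = [{0}] + [set() for _ in range(k)]
--     for x in nums:
--         reach = [reach[0]] + [reach[c + 1] | {s + x for s in reach[c]} for c in range(k)]
--     return target in reach[k]
-- ===== Notes on version B (the rewrite author's own statement) =====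
-- stated objective: alternative
-- what changed: Replaced the meet-in-the-middle enumeration of all combinations of both halves by a single-pass dynamic program over reachable (count, sum) pairs, with an explicit 0 < k < len(nums) guard in place of the per-combination exclusion of the empty and full subsets.
import Mathlib
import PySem

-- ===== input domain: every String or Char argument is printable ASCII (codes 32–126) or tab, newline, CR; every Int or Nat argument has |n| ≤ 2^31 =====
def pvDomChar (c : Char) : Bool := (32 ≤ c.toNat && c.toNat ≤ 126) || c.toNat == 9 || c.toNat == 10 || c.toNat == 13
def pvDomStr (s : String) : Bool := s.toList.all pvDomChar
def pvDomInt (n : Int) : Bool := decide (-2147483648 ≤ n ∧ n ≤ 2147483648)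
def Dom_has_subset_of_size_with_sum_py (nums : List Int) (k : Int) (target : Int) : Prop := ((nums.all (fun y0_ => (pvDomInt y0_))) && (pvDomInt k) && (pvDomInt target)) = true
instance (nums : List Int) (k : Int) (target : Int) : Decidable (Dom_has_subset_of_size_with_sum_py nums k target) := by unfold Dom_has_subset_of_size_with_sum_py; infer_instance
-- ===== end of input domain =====

-- B replaces A's meet-in-the-middle enumeration of all combinations of both halves by a
-- single-pass DP over reachable (count, sum) pairs (a different algorithm of comparable cost).

-- ===== PORT A =====
-- combinations(left, r) is ported as List.sublistsLen r left (the same collection of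
-- length-r subsequences; only their sums are consumed, so enumeration order is irrelevant).
def has_subset_of_size_with_sum_py (nums : List Int) (k : Int) (target : Int) : Bool :=
  let n := nums.length
  let left := nums.take (n / 2)
  let right := nums.drop (n / 2)
  let left_map : PySem.Dict Int (PySem.Set Int) :=
    (List.range (left.length + 1)).foldl (fun d r =>
      (List.sublistsLen r left).foldl
        (fun d c => d.modify (r : Int) PySem.Set.empty (fun s => PySem.Set.add s c.sum)) d)
      PySem.Dict.empty
  (List.range (right.length + 1)).any (fun r =>
    let need := k - (r : Int)
    if 0 ≤ need ∧ need ≤ (left.length : Int) then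
      (List.sublistsLen r right).any (fun c =>
        let s := c.sum
        if (left_map.getD need PySem.Set.empty).contains (target - s) then
          !(need == 0 && (r : Int) == 0) &&
          !(need == (left.length : Int) && (r : Int) == (right.length : Int))
        else false)
    else false)

-- ===== PORT B =====
def has_subset_of_size_with_sum_py_alt (nums : List Int) (k : Int) (target : Int) : Bool :=
  if 0 < k ∧ k < (nums.length : Int) then
    let reach0 : List (PySem.Set Int) :=
      [PySem.Set.ofList [0]] ++ List.replicate k.toNat PySem.Set.empty
    let reach := nums.foldl
      (fun reach x =>
        [reach.getD 0 PySem.Set.empty] ++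
        (List.range k.toNat).map (fun c =>
          PySem.Set.union (reach.getD (c + 1) PySem.Set.empty)
            (PySem.Set.ofList ((reach.getD c PySem.Set.empty).map (fun s => s + x)))))
      reach0
    (reach.getD k.toNat PySem.Set.empty).contains target
  else false

-- ===== PRECONDITION & SPEC =====
def Spec_has_subset_of_size_with_sum_py (nums : List Int) (k : Int) (target : Int) (out : Bool) : Prop := out = has_subset_of_size_with_sum_py_alt nums k target
instance (nums : List Int) (k : Int) (target : Int) (out : Bool) : Decidable (Spec_has_subset_of_size_with_sum_py nums k target out) := by unfold Spec_has_subset_of_size_with_sum_py; infer_instance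

-- ===== CLAIM (what is proved, stated in full; the proofs are below) =====
def Claim_equal_has_subset_of_size_with_sum_py : Prop := ∀ (nums : List Int) (k : Int) (target : Int), Dom_has_subset_of_size_with_sum_py nums k target → Spec_has_subset_of_size_with_sum_py nums k target (has_subset_of_size_with_sum_py nums k target)

-- ===== LEMMAS AND PROOFS =====

-- sums of the length-c subsequences of l
def pvSums (l : List Int) (c : Nat) : List Int := (List.sublistsLen c l).map List.sum

theorem pvMem_sums {l : List Int} {c : Nat} {t : Int} :
    t ∈ pvSums l c ↔ ∃ s : List Int, s.Sublist l ∧ s.length = c ∧ s.sum = t := by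
  simp only [pvSums, List.mem_map, List.mem_sublistsLen]
  constructor
  · rintro ⟨s, ⟨hs, hl⟩, he⟩; exact ⟨s, hs, hl, he⟩
  · rintro ⟨s, hs, hl, he⟩; exact ⟨s, ⟨hs, hl⟩, he⟩

-- inner dict fold of A: adding all sums under one key
theorem pvInner_fold (cs : List (List Int)) (d : PySem.Dict Int (PySem.Set Int)) (r q : Int) :
    ((cs.foldl (fun d c => d.modify r PySem.Set.empty (fun s => PySem.Set.add s c.sum)) d).getD q PySem.Set.empty)
      = if q = r then cs.foldl (fun s c => PySem.Set.add s c.sum) (d.getD r PySem.Set.empty)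
        else d.getD q PySem.Set.empty := by
  induction cs generalizing d with
  | nil =>
    simp only [List.foldl_nil]
    split_ifs with h
    · rw [h]
    · rfl
  | cons c cs ih =>
    simp only [List.foldl_cons, ih, PySem.Dict.getD_modify]
    split_ifs <;> rfl

-- characterization of A's left_map
theorem pvLeftmap_char (left : List Int) (m : Nat) (q t : Int) :
    t ∈ ((List.range m).foldl (fun d r =>
        (List.sublistsLen r left).foldl
          (fun d c => d.modify (r : Int) PySem.Set.empty (fun s => PySem.Set.add s c.sum)) d)
        PySem.Dict.empty).getD q PySem.Set.empty
      ↔ ∃ r < m, q = (r : Int) ∧ t ∈ pvSums left r := by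
  induction m with
  | zero => simp [PySem.Dict.getD_empty, PySem.Set.empty]
  | succ m ih =>
    rw [List.range_succ, List.foldl_append, List.foldl_cons, List.foldl_nil, pvInner_fold]
    split_ifs with hq
    · subst hq
      rw [PySem.Set.mem_foldl_add]
      have hm : ∀ r : Nat, ¬ (r < m ∧ ((m : Int) = (r : Int) ∧ t ∈ pvSums left r)) := by
        intro r ⟨hr, he, _⟩
        omega
      constructor
      · rintro (h | ⟨c, hc, he⟩)
        · rw [ih] at h
          obtain ⟨r, hr, he, _⟩ := h
          omega
        · refine ⟨m, by omega, rfl, ?_⟩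
          simp only [pvSums, List.mem_map]
          exact ⟨c, ⟨hc, he.symm⟩⟩
      · rintro ⟨r, hr, he, hmem⟩
        have : r = m := by omega
        subst this
        right
        simp only [pvSums, List.mem_map] at hmem
        obtain ⟨c, hc, he'⟩ := hmem
        exact ⟨c, hc, he'.symm⟩
    · rw [ih]
      constructor
      · rintro ⟨r, hr, he, hmem⟩; exact ⟨r, by omega, he, hmem⟩
      · rintro ⟨r, hr, he, hmem⟩
        refine ⟨r, ?_, he, hmem⟩
        rcases Nat.lt_succ_iff_lt_or_eq.mp hr with h | h
        · exact h
        · subst h; exact absurd he hq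

-- A = true iff a split with the guard conditions exists
theorem pvA_char (nums : List Int) (k target : Int) :
    has_subset_of_size_with_sum_py nums k target = true ↔
      ∃ r ≤ (nums.drop (nums.length / 2)).length, ∃ j ≤ (nums.take (nums.length / 2)).length,
        k = (j : Int) + (r : Int) ∧ ¬(j = 0 ∧ r = 0) ∧
        ¬(j = (nums.take (nums.length / 2)).length ∧ r = (nums.drop (nums.length / 2)).length) ∧
        ∃ cr ∈ List.sublistsLen r (nums.drop (nums.length / 2)),
          (target - cr.sum) ∈ pvSums (nums.take (nums.length / 2)) j := by
  unfold has_subset_of_size_with_sum_py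
  simp only [List.any_eq_true, List.mem_range]
  constructor
  · rintro ⟨r, hr, h⟩
    split_ifs at h with hcond
    · rw [List.any_eq_true] at h
      obtain ⟨c, hc, h2⟩ := h
      split_ifs at h2 with hmem
      · rw [PySem.Set.contains_iff, pvLeftmap_char] at hmem
        obtain ⟨j, hj, he, hs⟩ := hmem
        simp only [Bool.and_eq_true, Bool.not_eq_eq_eq_not, Bool.not_true, Bool.and_eq_false_iff,
          beq_eq_false_iff_ne, ne_eq] at h2
        exact ⟨r, by omega, j, by omega, by omega, by omega, by omega, c, hc, hs⟩
  · rintro ⟨r, hr, j, hj, hk, hg1, hg2, c, hc, hmem⟩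
    refine ⟨r, by omega, ?_⟩
    rw [if_pos (by omega), List.any_eq_true]
    refine ⟨c, hc, ?_⟩
    rw [if_pos]
    · simp only [Bool.and_eq_true, Bool.not_eq_eq_eq_not, Bool.not_true, Bool.and_eq_false_iff,
        beq_eq_false_iff_ne, ne_eq]
      constructor <;> omega
    · rw [PySem.Set.contains_iff, pvLeftmap_char]
      exact ⟨j, by omega, by omega, hmem⟩

-- subsequences of length c of l ++ [x], by sum
theorem pvConcat_char (l : List Int) (x : Int) (c : Nat) (t : Int) :
    (∃ s : List Int, s.Sublist (l ++ [x]) ∧ s.length = c ∧ s.sum = t) ↔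
      ((∃ s : List Int, s.Sublist l ∧ s.length = c ∧ s.sum = t) ∨
       (∃ c', c = c' + 1 ∧ ∃ s : List Int, s.Sublist l ∧ s.length = c' ∧ s.sum = t - x)) := by
  constructor
  · rintro ⟨s, hs, hl, he⟩
    rw [List.sublist_append_iff] at hs
    obtain ⟨s1, s2, rfl, h1, h2⟩ := hs
    rcases List.sublist_singleton.mp h2 with rfl | rfl
    · left; exact ⟨s1, by simpa using h1, by simpa using hl, by simpa using he⟩
    · right
      refine ⟨s1.length, by simp at hl; omega, s1, h1, rfl, ?_⟩
      simp at he; omega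
  · rintro (⟨s, hs, hl, he⟩ | ⟨c', rfl, s, hs, hl, he⟩)
    · exact ⟨s, hs.trans (List.sublist_append_left l [x]), hl, he⟩
    · exact ⟨s ++ [x], List.Sublist.append hs (List.Sublist.refl _), by simp [hl], by simp; omega⟩

-- getD of a mapped range, in range
theorem pvMapRangeGetD {α : Type} (g : Nat → α) (k c : Nat) (hc : c < k) (d : α) :
    ((List.range k).map g).getD c d = g c := by
  simp [List.getD, hc]

-- B's DP invariant: reach[c] holds exactly the sums of the length-c subsequences seen so far
theorem pvDP (k : Nat) (nums : List Int) :
    ∀ c ≤ k, ∀ t : Int,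
      t ∈ (nums.foldl
        (fun (reach : List (PySem.Set Int)) x =>
          [reach.getD 0 PySem.Set.empty] ++
          (List.range k).map (fun c =>
            PySem.Set.union (reach.getD (c + 1) PySem.Set.empty)
              (PySem.Set.ofList ((reach.getD c PySem.Set.empty).map (fun s => s + x)))))
        ([PySem.Set.ofList [0]] ++ List.replicate k PySem.Set.empty)).getD c PySem.Set.empty
      ↔ ∃ s : List Int, s.Sublist nums ∧ s.length = c ∧ s.sum = t := by
  induction nums using List.reverseRecOn with
  | nil =>
    intro c hc t
    match c with
    | 0 =>
      simp [PySem.Set.ofList, PySem.Set.empty, PySem.Set.add, List.getD, List.sublist_nil,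
        eq_comm]
    | c' + 1 =>
      have : (List.replicate k (PySem.Set.empty : PySem.Set Int)).getD c' PySem.Set.empty
          = PySem.Set.empty := by
        simp only [List.getD, List.getElem?_replicate]
        split <;> rfl
      simp only [List.foldl_nil, List.singleton_append, List.getD_cons_succ, this]
      simp only [PySem.Set.empty, List.not_mem_nil, false_iff]
      rintro ⟨s, hs, hl, -⟩
      rw [List.sublist_nil] at hs
      subst hs; simp at hl
  | append_singleton l x ih =>
    intro c hc t
    rw [List.foldl_append, List.foldl_cons, List.foldl_nil]
    simp only [List.singleton_append] at ih ⊢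
    match c with
    | 0 =>
      rw [List.getD_cons_zero, ih 0 (by omega) t, pvConcat_char]
      simp
    | c' + 1 =>
      rw [List.getD_cons_succ, pvMapRangeGetD _ k c' (by omega), PySem.Set.mem_union, PySem.Set.mem_ofList,
        List.mem_map, pvConcat_char]
      constructor
      · rintro (h | ⟨s', hs', rfl⟩)
        · exact Or.inl ((ih (c' + 1) hc _).mp h)
        · refine Or.inr ⟨c', rfl, ?_⟩
          have := (ih c' (by omega) s').mp hs'
          obtain ⟨s, hs, hl, he⟩ := this
          exact ⟨s, hs, hl, by omega⟩
      · rintro (h | ⟨c'', he, s, hs, hl, hsum⟩)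
        · exact Or.inl ((ih (c' + 1) hc t).mpr h)
        · exact Or.inr ⟨t - x, (ih c' (by omega) (t - x)).mpr ⟨s, hs, by omega, hsum⟩, by omega⟩

-- B = true iff 0 < k < n and some length-k subsequence sums to target
theorem pvB_char (nums : List Int) (k target : Int) :
    has_subset_of_size_with_sum_py_alt nums k target = true ↔
      0 < k ∧ k < (nums.length : Int) ∧
        ∃ s : List Int, s.Sublist nums ∧ s.length = k.toNat ∧ s.sum = target := by
  unfold has_subset_of_size_with_sum_py_alt
  split_ifs with h
  · show ((nums.foldl
        (fun (reach : List (PySem.Set Int)) x =>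
          [reach.getD 0 PySem.Set.empty] ++
          (List.range k.toNat).map (fun c =>
            PySem.Set.union (reach.getD (c + 1) PySem.Set.empty)
              (PySem.Set.ofList ((reach.getD c PySem.Set.empty).map (fun s => s + x)))))
        ([PySem.Set.ofList [0]] ++ List.replicate k.toNat PySem.Set.empty)).getD k.toNat
          PySem.Set.empty).contains target = true ↔ _
    rw [PySem.Set.contains_iff, pvDP k.toNat nums k.toNat (le_refl _) target]
    exact ⟨fun hx => ⟨h.1, h.2, hx⟩, fun hx => hx.2.2⟩
  · simp only [false_iff]
    rintro ⟨h1, h2, -⟩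
    exact h ⟨h1, h2⟩

-- the split characterization equals the plain subsequence characterization
theorem pvBridge (nums : List Int) (k target : Int) :
    (∃ r ≤ (nums.drop (nums.length / 2)).length, ∃ j ≤ (nums.take (nums.length / 2)).length,
        k = (j : Int) + (r : Int) ∧ ¬(j = 0 ∧ r = 0) ∧
        ¬(j = (nums.take (nums.length / 2)).length ∧ r = (nums.drop (nums.length / 2)).length) ∧
        ∃ cr ∈ List.sublistsLen r (nums.drop (nums.length / 2)),
          (target - cr.sum) ∈ pvSums (nums.take (nums.length / 2)) j)
      ↔ (0 < k ∧ k < (nums.length : Int) ∧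
          ∃ s : List Int, s.Sublist nums ∧ s.length = k.toNat ∧ s.sum = target) := by
  have hlen : (nums.take (nums.length / 2)).length + (nums.drop (nums.length / 2)).length
      = nums.length := by
    simp only [List.length_take, List.length_drop]
    omega
  have hsplit : nums.take (nums.length / 2) ++ nums.drop (nums.length / 2) = nums :=
    List.take_append_drop _ _
  constructor
  · rintro ⟨r, hr, j, hj, hk, hg1, hg2, cr, hcr, hmem⟩
    rw [List.mem_sublistsLen] at hcr
    rw [pvMem_sums] at hmem
    obtain ⟨cl, hcl, hcll, hcls⟩ := hmem
    have h0 : 0 < k := by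
      rcases Nat.eq_zero_or_pos (j + r) with h | h
      · exact absurd ⟨by omega, by omega⟩ hg1
      · omega
    have hn : k < (nums.length : Int) := by
      rcases Nat.lt_or_ge (j + r) ((nums.take (nums.length / 2)).length + (nums.drop (nums.length / 2)).length) with h | h
      · omega
      · exact absurd ⟨by omega, by omega⟩ hg2
    refine ⟨h0, hn, cl ++ cr, ?_, ?_, ?_⟩
    · have h' : (cl ++ cr).Sublist (nums.take (nums.length / 2) ++ nums.drop (nums.length / 2)) :=
        List.Sublist.append hcl hcr.1
      rwa [hsplit] at h'
    · simp only [List.length_append, hcll, hcr.2]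
      omega
    · simp only [List.sum_append, hcls]
      omega
  · rintro ⟨h0, hn, s, hs, hl, he⟩
    rw [← hsplit, List.sublist_append_iff] at hs
    obtain ⟨s1, s2, rfl, h1, h2⟩ := hs
    refine ⟨s2.length, h2.length_le, s1.length, h1.length_le, ?_, ?_, ?_, s2,
      List.mem_sublistsLen.mpr ⟨h2, rfl⟩, ?_⟩
    · have := List.length_append (as := s1) (bs := s2)
      omega
    · rintro ⟨hz1, hz2⟩
      have : s1.length + s2.length = k.toNat := by simpa using hl
      omega
    · rintro ⟨hz1, hz2⟩
      have : s1.length + s2.length = k.toNat := by simpa using hl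
      omega
    · rw [pvMem_sums]
      refine ⟨s1, h1, rfl, ?_⟩
      have : s1.sum + s2.sum = target := by simpa using he
      omega

-- ===== VERDICT (by name: the statement is the Claim_ definition above) =====
theorem has_subset_of_size_with_sum_py_spec : Claim_equal_has_subset_of_size_with_sum_py := by
  intro nums k target _
  unfold Spec_has_subset_of_size_with_sum_py
  rw [Bool.eq_iff_iff]
  exact (pvA_char nums k target).trans ((pvBridge nums k target).trans (pvB_char nums k target).symm)
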